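-- pv_equiv track=rewrite | github.com/G0LDF0X/Python-Coding-Test-Study | innopark/0711.py | solution
-- ===== SOURCE A (Python) =====
-- def solution(progresses, speeds):
--     answer = []
--     days = []
--     for progress, speed in zip(progresses, speeds):     #enumerate와 비슷
--         days_remaining = ((100 - progress) // speed)
--         days.append(days_remaining)
--
--     while days:
--         current_day = days.pop(0)
--         count = 1
--         while days and days[0] <= current_day:
--             days.pop(0)
--             count += 1
--         answer.append(count)
--
--     return answer
-- ===== SOURCE B (Python) =====
-- def solution(progresses, speeds):
--     days = [(100 - p) // s for p, s in zip(progresses, speeds)]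
--     answer = []
--     cur = None
--     count = 0
--     for d in days:
--         if cur is not None and d <= cur:
--             count += 1
--         else:
--             if cur is not None:
--                 answer.append(count)
--             cur = d
--             count = 1
--     if cur is not None:
--         answer.append(count)
--     return answer
-- ===== Notes on version B (the rewrite author's own statement) =====
-- stated objective: faster
-- what changed: Replaces the nested while loops that repeatedly pop(0) runs off the days list by a single flat pass keeping a group leader and a running count, emitting each group count as the scan goes.
import Mathlib
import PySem

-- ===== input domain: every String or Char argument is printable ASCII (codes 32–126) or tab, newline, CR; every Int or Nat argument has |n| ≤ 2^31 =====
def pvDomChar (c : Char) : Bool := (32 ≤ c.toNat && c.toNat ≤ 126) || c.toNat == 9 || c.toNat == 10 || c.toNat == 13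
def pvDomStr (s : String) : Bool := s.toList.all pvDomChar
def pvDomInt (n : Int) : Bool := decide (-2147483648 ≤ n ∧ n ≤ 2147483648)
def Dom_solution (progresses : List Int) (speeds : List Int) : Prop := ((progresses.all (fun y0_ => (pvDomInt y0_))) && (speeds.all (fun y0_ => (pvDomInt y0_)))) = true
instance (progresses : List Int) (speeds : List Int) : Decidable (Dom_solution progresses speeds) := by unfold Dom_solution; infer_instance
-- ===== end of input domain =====

-- B replaces A's nested while loops (repeated pop(0) of runs) by one flat scan with a group leader and running count: simpler, one pass.


-- ===== PORT A =====
-- inner while: consume leading days ≤ current_day, counting them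
def solInner (cur : Int) (count : Int) : List Int → Int × List Int
  | [] => (count, [])
  | d :: rest => if d ≤ cur then solInner cur (count + 1) rest else (count, d :: rest)

theorem solInner_len (cur count : Int) : ∀ ds : List Int, (solInner cur count ds).2.length ≤ ds.length := by
  intro ds
  induction ds generalizing count with
  | nil => simp [solInner]
  | cons d rest ih =>
    simp only [solInner]
    split
    · exact le_trans (ih _) (Nat.le_succ _)
    · simp

-- outer while: pop the first day, count its run, append
def solOuter : List Int → List Int
  | [] => []
  | d :: rest =>
    let r := solInner d 1 rest
    r.1 :: solOuter r.2
termination_by ds => ds.length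
decreasing_by
  exact Nat.lt_succ_of_le (solInner_len d 1 rest)

def solution (progresses : List Int) (speeds : List Int) : List Int :=
  let days := (progresses.zip speeds).foldl
    (fun acc ps => acc ++ [PySem.Int.floordiv (100 - ps.1) ps.2]) []
  solOuter days

-- ===== PORT B =====
-- one flat pass: state = (answer so far, current group leader (none before the first day), running count)
def solStep (st : List Int × Option Int × Int) (d : Int) : List Int × Option Int × Int :=
  match st with
  | (ans, some cur, count) =>
    if d ≤ cur then (ans, some cur, count + 1)
    else (ans ++ [count], some d, 1)
  | (ans, none, _) => (ans, some d, 1)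

def solution_alt (progresses : List Int) (speeds : List Int) : List Int :=
  let days := (progresses.zip speeds).map (fun ps => PySem.Int.floordiv (100 - ps.1) ps.2)
  let st := days.foldl solStep ([], none, 0)
  match st with
  | (ans, some _, count) => ans ++ [count]
  | (ans, none, _) => ans

-- ===== PRECONDITION & SPEC =====
-- Pre_ excludes exactly the inputs where A raises ZeroDivisionError: a zero speed within the zipped prefix.
def Pre_solution (progresses : List Int) (speeds : List Int) : Prop :=
  ∀ x ∈ progresses.zip speeds, x.2 ≠ 0
instance (progresses : List Int) (speeds : List Int) : Decidable (Pre_solution progresses speeds) := by unfold Pre_solution; infer_instance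

def pvWitness_solution : List Int × List Int := ([93, 30, 55], [1, 30, 5])

def Spec_solution (progresses : List Int) (speeds : List Int) (out : List Int) : Prop := out = solution_alt progresses speeds
instance (progresses : List Int) (speeds : List Int) (out : List Int) : Decidable (Spec_solution progresses speeds out) := by unfold Spec_solution; infer_instance

-- ===== CLAIM (what is proved, stated in full; the proofs are below) =====
def Claim_equal_solution : Prop := ∀ (progresses : List Int) (speeds : List Int), Dom_solution progresses speeds → Pre_solution progresses speeds → Spec_solution progresses speeds (solution progresses speeds)

-- ===== LEMMAS AND PROOFS =====

theorem days_eq (l : List (Int × Int)) :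
    l.foldl (fun acc ps => acc ++ [PySem.Int.floordiv (100 - ps.1) ps.2]) [] =
    l.map (fun ps => PySem.Int.floordiv (100 - ps.1) ps.2) := by
  have h : ∀ (l : List (Int × Int)) (acc : List Int),
      l.foldl (fun acc ps => acc ++ [PySem.Int.floordiv (100 - ps.1) ps.2]) acc =
      acc ++ l.map (fun ps => PySem.Int.floordiv (100 - ps.1) ps.2) := by
    intro l
    induction l with
    | nil => simp
    | cons p t ih => intro acc; simp [List.foldl, ih]
  simpa using h l []

-- the flat scan with an open group (cur, count) produces ans ++ (finishing that group via solInner, then solOuter)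
theorem scan_inv (ds : List Int) : ∀ (ans : List Int) (cur count : Int),
    (match ds.foldl solStep (ans, some cur, count) with
     | (a, some _, c) => a ++ [c]
     | (a, none, _) => a) =
    ans ++ ((solInner cur count ds).1 :: solOuter (solInner cur count ds).2) := by
  induction ds with
  | nil => intro ans cur count; simp [solInner, solOuter]
  | cons d rest ih =>
    intro ans cur count
    simp only [List.foldl, solStep, solInner]
    by_cases h : d ≤ cur
    · simp [h, ih]
    · simp only [h, ite_false]
      rw [ih]
      rw [solOuter]
      simp

theorem solution_spec : Claim_equal_solution := by
  intro progresses speeds _ _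
  unfold Spec_solution solution solution_alt
  rw [days_eq]
  generalize (progresses.zip speeds).map (fun ps => PySem.Int.floordiv (100 - ps.1) ps.2) = ds
  cases ds with
  | nil => simp [solOuter]
  | cons d rest =>
    simp only [List.foldl, solStep]
    rw [scan_inv]
    rw [solOuter]
    simp
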